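-- pv_equiv track=rewrite | github.com/demelue/easy-medium-code-challenges | Python/String/kth_frequent_string.py | kth_frequent_string
-- ===== SOURCE A (Python) =====
-- def kth_frequent_string(words, k):
--
--     buf = dict()
--     for word in words:
--         if word not in buf:
--             buf[word] = 0
--         buf[word] += 1
--
--     output = []
--     for data in buf:
--         if buf[data] == k:
--             output.append(data)
--
--     return output
-- ===== SOURCE B (Python) =====
-- def kth_frequent_string(words, k):
--     counts = {}
--     for word in words:
--         counts[word] = counts.get(word, 0) + 1
--
--     index = {}
--     for word, c in counts.items():
--         index.setdefault(c, []).append(word)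
--
--     return index.get(k, [])
-- ===== Notes on version B (the rewrite author's own statement) =====
-- stated objective: alternative
-- what changed: B replaces A's filtering scan of the count dict by value==k with an inverse index mapping each frequency to its words (built once via setdefault/append), so the answer is a single index.get(k, []) lookup.
import Mathlib
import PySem

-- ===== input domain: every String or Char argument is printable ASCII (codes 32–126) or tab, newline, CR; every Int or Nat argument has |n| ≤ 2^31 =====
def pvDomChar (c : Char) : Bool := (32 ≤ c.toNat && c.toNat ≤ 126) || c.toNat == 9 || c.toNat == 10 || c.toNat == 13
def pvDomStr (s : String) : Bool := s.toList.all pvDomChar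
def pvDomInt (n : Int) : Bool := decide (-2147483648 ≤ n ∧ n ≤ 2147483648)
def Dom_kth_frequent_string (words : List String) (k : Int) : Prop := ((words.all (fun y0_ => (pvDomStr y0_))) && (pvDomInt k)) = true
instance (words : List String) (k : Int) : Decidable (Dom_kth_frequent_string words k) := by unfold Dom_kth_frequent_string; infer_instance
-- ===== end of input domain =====

-- B replaces A's value-filtering scan over the count dict by an inverse frequency→words index looked up once at k (objective: alternative decomposition, same cost).

-- ===== PORT A =====
-- the body of A's first loop: 'if word not in buf: buf[word] = 0' then 'buf[word] += 1'
def bufStep (buf : PySem.Dict String Int) (word : String) : PySem.Dict String Int :=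
  let buf := if buf.contains word = false then buf.insert word 0 else buf
  buf.insert word (buf.getD word 0 + 1)

def kth_frequent_string (words : List String) (k : Int) : List String :=
  let buf := words.foldl bufStep PySem.Dict.empty
  let output := buf.keys.foldl (fun output data =>
      if buf.getD data 0 == k then output ++ [data] else output) []
  output

-- ===== PORT B =====
def kth_frequent_string_alt (words : List String) (k : Int) : List String :=
  let counts := words.foldl (fun counts word =>
      counts.insert word (counts.getD word 0 + 1)) PySem.Dict.empty
  let index := counts.items.foldl
      (fun index wc => index.modify wc.2 [] (· ++ [wc.1]))
      (PySem.Dict.empty : PySem.Dict Int (List String))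
  index.getD k []

-- ===== PRECONDITION & SPEC =====
def Spec_kth_frequent_string (words : List String) (k : Int) (out : List String) : Prop := out = kth_frequent_string_alt words k
instance (words : List String) (k : Int) (out : List String) : Decidable (Spec_kth_frequent_string words k out) := by unfold Spec_kth_frequent_string; infer_instance

-- ===== CLAIM (what is proved, stated in full; the proofs are below) =====
def Claim_equal_kth_frequent_string : Prop := ∀ (words : List String) (k : Int), Dom_kth_frequent_string words k → Spec_kth_frequent_string words k (kth_frequent_string words k)

-- ===== LEMMAS AND PROOFS =====

-- A's guarded two-step update equals the single counting insert, on any dict.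
lemma bufStep_eq : bufStep = fun (d : PySem.Dict String Int) w => d.insert w (d.getD w 0 + 1) := by
  funext d w
  unfold bufStep
  by_cases h : d.contains w = false
  · simp [h, PySem.Dict.getD_insert_self, PySem.Dict.insert_insert_self,
      PySem.Dict.getD_of_not_contains]
  · simp [h]

-- both counting loops build Counter(words)
lemma buf_eq_counter (words : List String) :
    words.foldl bufStep PySem.Dict.empty = PySem.Dict.counter words := by
  rw [bufStep_eq]
  exact PySem.Dict.foldl_insert_getD_add_one_eq_counter words

-- B's inverse-index lookup at k, through the swapped form of the library grouping lemma
lemma index_getD (items : List (String × Int)) (k : Int) :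
    (items.foldl (fun index wc => index.modify wc.2 [] (· ++ [wc.1]))
      (PySem.Dict.empty : PySem.Dict Int (List String))).getD k []
    = (items.filter (fun p => p.2 == k)).map (·.1) := by
  have h := PySem.Dict.getD_foldl_modify_append
      (l := items.map (fun p => (p.2, p.1)))
      (d := (PySem.Dict.empty : PySem.Dict Int (List String))) (c := k)
  rw [List.foldl_map] at h
  simpa [List.filter_map, List.map_map, Function.comp] using h

-- A evaluated: the keys of Counter(words) whose count is k
lemma A_eval (words : List String) (k : Int) :
    kth_frequent_string words k
      = (PySem.Dict.counter words).keys.filter (fun w => (PySem.Dict.counter words).getD w 0 == k) := by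
  show (let buf := words.foldl bufStep PySem.Dict.empty
        let output := buf.keys.foldl (fun output data =>
            if buf.getD data 0 == k then output ++ [data] else output) []
        output) = _
  rw [buf_eq_counter]
  show (PySem.Dict.counter words).keys.foldl (fun output data =>
      if (PySem.Dict.counter words).getD data 0 == k then output ++ [data] else output) [] = _
  rw [PySem.List.foldl_append_if_eq_filter]
  simp

-- B evaluated: the same list, via the inverse index over Counter(words).items
lemma B_eval (words : List String) (k : Int) :
    kth_frequent_string_alt words k
      = (PySem.Dict.counter words).keys.filter (fun w => (PySem.Dict.counter words).getD w 0 == k) := by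
  have hc : words.foldl (fun (counts : PySem.Dict String Int) word =>
      counts.insert word (counts.getD word 0 + 1)) PySem.Dict.empty = PySem.Dict.counter words :=
    PySem.Dict.foldl_insert_getD_add_one_eq_counter words
  show (let counts := words.foldl (fun (counts : PySem.Dict String Int) word =>
          counts.insert word (counts.getD word 0 + 1)) PySem.Dict.empty
        let index := counts.items.foldl
          (fun index wc => index.modify wc.2 [] (· ++ [wc.1]))
          (PySem.Dict.empty : PySem.Dict Int (List String))
        index.getD k []) = _
  rw [hc]
  show ((PySem.Dict.counter words).items.foldl
      (fun index wc => index.modify wc.2 [] (· ++ [wc.1]))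
      (PySem.Dict.empty : PySem.Dict Int (List String))).getD k [] = _
  rw [index_getD,
    PySem.Dict.items_eq_map_keys (PySem.Dict.counter words) (PySem.Dict.nodup_keys_counter words) 0]
  simp [List.filter_map, List.map_map, Function.comp_def]

-- ===== VERDICT (by name: the statement is the Claim_ definition above) =====
theorem kth_frequent_string_spec : Claim_equal_kth_frequent_string := by
  intro words k _
  unfold Spec_kth_frequent_string
  rw [A_eval, B_eval]
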